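-- pv_equiv track=rewrite | github.com/ret2future/CTFs-Writeups-2026 | DawgCTF_2026/challenges/MrWorldwide/exhaustive_solver.py | sum_of_second_minimum_edges
-- ===== SOURCE A (Python) =====
-- def sum_of_second_minimum_edges(matrix):
--     """Sum of second minimum edge for each node"""
--     n = len(matrix)
--     total = 0
--     for i in range(n):
--         edges = sorted(matrix[i][j] for j in range(n) if i != j)
--         if len(edges) >= 2:
--             total += edges[1]
--     return total // 2  # Each edge counted twice
-- ===== SOURCE B (Python) =====
-- def sum_of_second_minimum_edges(matrix):
--     """Sum of second minimum edge for each node"""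
--     n = len(matrix)
--     total = 0
--     for i in range(n):
--         row = matrix[i]
--         m1 = m2 = None
--         for j in range(n):
--             if j == i:
--                 continue
--             v = row[j]
--             if m1 is None or v < m1:
--                 m1, m2 = v, m1
--             elif m2 is None or v < m2:
--                 m2 = v
--         if m2 is not None:
--             total += m2
--     return total // 2
-- ===== Notes on version B (the rewrite author's own statement) =====
-- stated objective: alternative
-- what changed: Instead of sorting each row's off-diagonal entries and taking index 1, B tracks the two smallest values of each row in a single linear scan (no per-row sort).
import Mathlib
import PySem

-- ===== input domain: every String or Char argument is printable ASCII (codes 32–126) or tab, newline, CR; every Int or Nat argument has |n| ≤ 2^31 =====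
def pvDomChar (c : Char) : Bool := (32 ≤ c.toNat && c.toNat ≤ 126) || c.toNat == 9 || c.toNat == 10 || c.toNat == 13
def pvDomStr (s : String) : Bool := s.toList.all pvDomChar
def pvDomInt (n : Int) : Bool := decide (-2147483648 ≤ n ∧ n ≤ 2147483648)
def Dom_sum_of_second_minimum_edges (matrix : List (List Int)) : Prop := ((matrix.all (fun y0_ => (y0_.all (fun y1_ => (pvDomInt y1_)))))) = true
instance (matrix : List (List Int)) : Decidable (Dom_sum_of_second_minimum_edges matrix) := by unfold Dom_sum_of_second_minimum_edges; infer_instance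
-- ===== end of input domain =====

-- B replaces the per-row sort (take index 1) by a single linear scan tracking the two
-- smallest off-diagonal values of each row (alternative algorithm, no per-row sort).

-- ===== PORT A =====
def sum_of_second_minimum_edges (matrix : List (List Int)) : Int :=
  let n : Int := matrix.length
  let total : Int :=
    (PySem.List.pyRange 0 n 1).foldl (fun total i =>
      let edges := PySem.List.sorted
        (((PySem.List.pyRange 0 n 1).filter (fun j => i != j)).map
          (fun j => PySem.List.pyGetD (PySem.List.pyGetD matrix i []) j 0))
        (fun x => x) false
      if 2 ≤ edges.length then total + PySem.List.pyGetD edges 1 0 else total) 0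
  PySem.Int.floordiv total 2

-- ===== PORT B =====
-- one step of B's inner loop: fold the running (m1, m2) pair with a new value v
def pvTwoMinStep (p : Option Int × Option Int) (v : Int) : Option Int × Option Int :=
  if p.1.all (fun m1 => v < m1) then (some v, p.1)
  else if p.2.all (fun m2 => v < m2) then (p.1, some v)
  else p

def sum_of_second_minimum_edges_alt (matrix : List (List Int)) : Int :=
  let n : Int := matrix.length
  let total : Int :=
    (PySem.List.pyRange 0 n 1).foldl (fun total i =>
      let row := PySem.List.pyGetD matrix i []
      let p := (PySem.List.pyRange 0 n 1).foldl
        (fun p j => if j == i then p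
                    else pvTwoMinStep p (PySem.List.pyGetD row j 0)) (none, none)
      match p.2 with
      | some m2 => total + m2
      | none => total) 0
  PySem.Int.floordiv total 2

-- ===== PRECONDITION & SPEC =====
-- Pre_ excludes exactly the ragged matrices on which A raises IndexError
-- (some accessed off-diagonal entry matrix[i][j], j < n, j ≠ i, is out of range).
def Pre_sum_of_second_minimum_edges (matrix : List (List Int)) : Prop :=
  ∀ i, i < matrix.length → ∀ j, j < matrix.length → j ≠ i → j < (matrix.getD i []).length
instance (matrix : List (List Int)) : Decidable (Pre_sum_of_second_minimum_edges matrix) := by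
  unfold Pre_sum_of_second_minimum_edges; infer_instance

def pvWitness_sum_of_second_minimum_edges : List (List Int) := [[0, 1], [1, 0]]

def Spec_sum_of_second_minimum_edges (matrix : List (List Int)) (out : Int) : Prop := out = sum_of_second_minimum_edges_alt matrix
instance (matrix : List (List Int)) (out : Int) : Decidable (Spec_sum_of_second_minimum_edges matrix out) := by unfold Spec_sum_of_second_minimum_edges; infer_instance

-- ===== CLAIM (what is proved, stated in full; the proofs are below) =====
def Claim_equal_sum_of_second_minimum_edges : Prop := ∀ (matrix : List (List Int)), Dom_sum_of_second_minimum_edges matrix → Pre_sum_of_second_minimum_edges matrix → Spec_sum_of_second_minimum_edges matrix (sum_of_second_minimum_edges matrix)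

-- ===== LEMMAS AND PROOFS =====

-- first two elements of a (sorted) list
def pvTwo2 : List Int → Option Int × Option Int
  | [] => (none, none)
  | [a] => (some a, none)
  | a :: b :: _ => (some a, some b)

-- B's skipping inner fold is the fold of pvTwoMinStep over A's (unsorted) edges list
theorem pvFold_skip_eq (i : Int) (f : Int → Int) :
    ∀ (xs : List Int) (init : Option Int × Option Int),
      xs.foldl (fun p j => if j == i then p else pvTwoMinStep p (f j)) init
        = ((xs.filter (fun j => i != j)).map f).foldl pvTwoMinStep init := by
  intro xs
  induction xs with
  | nil => intro init; rfl
  | cons x t ih =>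
      intro init
      simp only [List.foldl_cons, List.filter_cons]
      by_cases h : x = i
      · simp only [h, beq_self_eq_true, if_true, bne_self_eq_false, Bool.false_eq_true,
          if_false]
        exact ih init
      · have h1 : (x == i) = false := by simp [h]
        have h2 : (i != x) = true := by simp [Ne.symm h]
        simp only [h1, Bool.false_eq_true, if_false, h2, if_true, List.map_cons,
          List.foldl_cons]
        exact ih (pvTwoMinStep init (f x))

-- inserting v into a ≤-sorted list: the first two elements transform by pvTwoMinStep
theorem pvTwo2_orderedInsert (s : List Int) (hs : s.Pairwise (· ≤ ·)) (v : Int) :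
    pvTwo2 (List.orderedInsert (· ≤ ·) v s) = pvTwoMinStep (pvTwo2 s) v := by
  match s with
  | [] => rfl
  | [a] =>
      simp only [List.orderedInsert, pvTwo2, pvTwoMinStep, Option.all_some, Option.all_none]
      by_cases hva : v ≤ a
      · by_cases hlt : v < a
        · simp [hva, hlt]
        · have : v = a := le_antisymm hva (by omega)
          subst this
          simp
      · have hlt : ¬ v < a := by omega
        simp [hva, hlt]
  | a :: b :: t =>
      have hab : a ≤ b := (List.pairwise_cons.mp hs).1 b (by simp)
      simp only [List.orderedInsert, pvTwo2, pvTwoMinStep, Option.all_some]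
      by_cases hva : v ≤ a
      · by_cases hlt : v < a
        · simp [hva, hlt]
        · have hveq : v = a := le_antisymm hva (by omega)
          subst hveq
          by_cases hvb : v < b
          · simp [hvb]
          · have : b = v := le_antisymm (by omega) hab
            subst this
            simp
      · have hlt : ¬ v < a := by omega
        by_cases hvb : v ≤ b
        · by_cases hvb' : v < b
          · simp [hva, hlt, hvb, hvb']
          · have : v = b := le_antisymm hvb (by omega)
            subst this
            simp [hva, hlt]
        · have hvb' : ¬ v < b := by omega
          simp [hva, hlt, hvb, hvb']

-- appending v to the multiset: PySem's sort equals ordered insertion into the old sort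
theorem pvSorted_append (l : List Int) (v : Int) :
    PySem.List.sorted (l ++ [v]) (fun x => x) false
      = List.orderedInsert (· ≤ ·) v (PySem.List.sorted l (fun x => x) false) := by
  apply PySem.List.sorted_id_eq_of_perm_of_pairwise
  · exact (List.perm_orderedInsert _ _ _).trans
      (((PySem.List.sorted_perm l _ _).cons v).trans
        (List.perm_append_comm (l₁ := [v]) (l₂ := l)))
  · simpa using List.Pairwise.orderedInsert (r := (· ≤ ·)) v _
      (by simpa using PySem.List.sorted_pairwise l (fun x => x))

-- the two-min fold computes the first two elements of the sorted list
theorem pvFold_eq_two2_sorted (l : List Int) :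
    l.foldl pvTwoMinStep (none, none) = pvTwo2 (PySem.List.sorted l (fun x => x) false) := by
  induction l using List.reverseRecOn with
  | nil => rfl
  | append_singleton t v ih =>
      rw [List.foldl_append, List.foldl_cons, List.foldl_nil, ih, pvSorted_append,
        pvTwo2_orderedInsert _ (PySem.List.sorted_pairwise t (fun x => x)) v]

-- per-row contributions of A and B agree
theorem pvRow_eq (l : List Int) (total : Int) :
    (if 2 ≤ (PySem.List.sorted l (fun x => x) false).length
       then total + PySem.List.pyGetD (PySem.List.sorted l (fun x => x) false) 1 0
       else total)
      = (match (l.foldl pvTwoMinStep (none, none)).2 with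
         | some m2 => total + m2
         | none => total) := by
  rw [pvFold_eq_two2_sorted]
  match h : PySem.List.sorted l (fun x => x) false with
  | [] => simp [pvTwo2]
  | [a] => simp [pvTwo2]
  | a :: b :: t =>
      simp [pvTwo2, PySem.List.pyGetD]

-- ===== VERDICT (by name: the statement is the Claim_ definition above) =====
theorem sum_of_second_minimum_edges_spec : Claim_equal_sum_of_second_minimum_edges := by
  intro matrix _ _
  unfold Spec_sum_of_second_minimum_edges
  unfold sum_of_second_minimum_edges sum_of_second_minimum_edges_alt
  simp only
  congr 1
  apply PySem.List.foldl_congr_mem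
  intro total i _
  rw [pvFold_skip_eq, ← pvRow_eq]
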